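-- pv_equiv track=rewrite | github.com/TobiasWooldridge/WaveCap-SDR | backend/wavecapsdr/api.py | _get_stable_device_id
-- ===== SOURCE A (Python) =====
-- def _get_stable_device_id(device_id: str) -> str:
--     """Extract a stable identifier from a SoapySDR device ID string.
--
--     Device IDs can contain volatile fields like 'tuner' that change based on
--     device availability. This function extracts driver + serial (or label) to
--     create a stable ID for deduplication.
--     """
--     driver = ""
--     serial = ""
--     label = ""
--     for part in device_id.split(","):
--         if part.startswith("driver="):
--             driver = part.split("=", 1)[1]
--         elif part.startswith("serial="):
--             serial = part.split("=", 1)[1]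
--         elif part.startswith("label="):
--             label = part.split("=", 1)[1]
--     # Use serial if available, otherwise fall back to label
--     return f"{driver}:{serial}" if serial else f"{driver}:{label}"
-- ===== SOURCE B (Python) =====
-- def _get_stable_device_id(device_id: str) -> str:
--     """Extract a stable identifier from a SoapySDR device ID string.
--
--     Splits once, then resolves each key independently: the value of the
--     LAST 'key=...' part wins (scan from the right, take the first hit).
--     """
--     parts = device_id.split(",")
--
--     def last_value(key: str) -> str:
--         prefix = key + "="
--         return next((p[len(prefix):] for p in reversed(parts) if p.startswith(prefix)), "")
--
--     driver = last_value("driver")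
--     serial = last_value("serial")
--     label = last_value("label")
--     return f"{driver}:{serial or label}"
-- ===== Notes on version B (the rewrite author's own statement) =====
-- stated objective: idiomatic
-- what changed: A threads three accumulator variables through one left-to-right if/elif scan; B splits once and resolves each key independently, scanning the parts from the right and taking the first (i.e. last) matching part via next() over a generator, with serial falling back to label.
import Mathlib
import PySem

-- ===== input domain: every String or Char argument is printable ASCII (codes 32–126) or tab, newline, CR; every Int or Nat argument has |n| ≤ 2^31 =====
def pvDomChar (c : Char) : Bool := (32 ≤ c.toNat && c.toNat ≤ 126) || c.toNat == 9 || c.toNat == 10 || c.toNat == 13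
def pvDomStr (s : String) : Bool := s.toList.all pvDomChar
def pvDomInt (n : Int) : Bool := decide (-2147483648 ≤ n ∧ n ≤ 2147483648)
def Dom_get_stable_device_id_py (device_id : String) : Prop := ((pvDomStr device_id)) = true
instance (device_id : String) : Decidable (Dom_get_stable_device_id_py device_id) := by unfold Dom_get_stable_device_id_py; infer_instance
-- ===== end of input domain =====

-- B resolves each key independently by a right-to-left scan for the last 'key=' part, instead of A's
-- three-accumulator left-to-right if/elif scan; proved to return the same string on all inputs.


-- ===== PORT A =====
-- part.split("=", 1)[1]; the index 1 is in range whenever the caller has checked part.startswith("key="),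
-- so the pyGetD default [] is never read (totalizing guard only).
def pvValA (part : List Char) : List Char :=
  PySem.List.pyGetD (PySem.Chars.splitOnMax part "=".toList 1) 1 []

def pvStepA (st : List Char × List Char × List Char) (part : List Char) :
    List Char × List Char × List Char :=
  if PySem.Chars.startswith part "driver=".toList then (pvValA part, st.2.1, st.2.2)
  else if PySem.Chars.startswith part "serial=".toList then (st.1, pvValA part, st.2.2)
  else if PySem.Chars.startswith part "label=".toList then (st.1, st.2.1, pvValA part)
  else st

def get_stable_device_id_py (device_id : String) : String :=
  let r := (PySem.Chars.splitOn device_id.toList ",".toList).foldl pvStepA ([], [], [])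
  -- f"{driver}:{serial}" if serial else f"{driver}:{label}"
  if r.2.1 ≠ [] then String.ofList (r.1 ++ ':' :: r.2.1) else String.ofList (r.1 ++ ':' :: r.2.2)

-- ===== PORT B =====
-- next((p[len(prefix):] for p in reversed(parts) if p.startswith(prefix)), "")
def pvLastValue (parts : List (List Char)) (key : List Char) : List Char :=
  let pre := key ++ "=".toList
  (((parts.reverse.find? (fun p => PySem.Chars.startswith p pre))).map
    (fun p => p.drop pre.length)).getD []

def get_stable_device_id_py_alt (device_id : String) : String :=
  let parts := PySem.Chars.splitOn device_id.toList ",".toList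
  let driver := pvLastValue parts "driver".toList
  let serial := pvLastValue parts "serial".toList
  let label := pvLastValue parts "label".toList
  -- f"{driver}:{serial or label}"
  String.ofList (driver ++ ':' :: (if serial ≠ [] then serial else label))

-- ===== PRECONDITION & SPEC =====
def Spec_get_stable_device_id_py (device_id : String) (out : String) : Prop := out = get_stable_device_id_py_alt device_id
instance (device_id : String) (out : String) : Decidable (Spec_get_stable_device_id_py device_id out) := by unfold Spec_get_stable_device_id_py; infer_instance

-- ===== CLAIM (what is proved, stated in full; the proofs are below) =====
def Claim_equal_get_stable_device_id_py : Prop := ∀ (device_id : String), Dom_get_stable_device_id_py device_id → Spec_get_stable_device_id_py device_id (get_stable_device_id_py device_id)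

-- ===== LEMMAS AND PROOFS =====

theorem pv_go_zero (fuel : Nat) (l cur : List Char) (acc : List (List Char)) :
    PySem.Chars.splitOnMax.go ['='] (fuel+1) 0 l cur acc = ((cur.reverse ++ l) :: acc).reverse := by
  cases l <;> simp [PySem.Chars.splitOnMax.go]

theorem pv_go_step (fuel : Nat) (c : Char) (h : c ≠ '=') (l cur : List Char) (acc : List (List Char)) :
    PySem.Chars.splitOnMax.go ['='] (fuel+1) 1 (c :: l) cur acc
      = PySem.Chars.splitOnMax.go ['='] fuel 1 l (c :: cur) acc := by
  simp [PySem.Chars.splitOnMax.go, List.isPrefixOf]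
  intro hc; exact absurd hc.symm h

theorem pv_go_hit (fuel : Nat) (l cur : List Char) (acc : List (List Char)) :
    PySem.Chars.splitOnMax.go ['='] (fuel+1) 1 ('=' :: l) cur acc
      = PySem.Chars.splitOnMax.go ['='] fuel 0 l [] (cur.reverse :: acc) := by
  simp [PySem.Chars.splitOnMax.go, List.isPrefixOf]

theorem pv_go_main : ∀ (a : List Char), '=' ∉ a → ∀ (b cur : List Char) (acc : List (List Char)) (fuel : Nat),
    (a ++ '=' :: b).length < fuel →
    PySem.Chars.splitOnMax.go ['='] fuel 1 (a ++ '=' :: b) cur acc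
      = acc.reverse ++ [cur.reverse ++ a, b] := by
  intro a
  induction a with
  | nil =>
    intro _ b cur acc fuel hf
    obtain ⟨f, rfl⟩ : ∃ f, fuel = f + 1 := ⟨fuel - 1, by omega⟩
    simp at hf
    obtain ⟨f', rfl⟩ : ∃ f', f = f' + 1 := ⟨f - 1, by omega⟩
    rw [List.nil_append, pv_go_hit, pv_go_zero]
    simp
  | cons c a ih =>
    intro hmem b cur acc fuel hf
    obtain ⟨f, rfl⟩ : ∃ f, fuel = f + 1 := ⟨fuel - 1, by omega⟩
    rw [List.cons_append, pv_go_step f c (by simp at hmem; tauto)]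
    rw [ih (by simp at hmem; tauto) b (c :: cur) acc f (by simp at hf ⊢; omega)]
    simp

theorem pv_splitOnMax_eq (a b : List Char) (h : '=' ∉ a) :
    PySem.Chars.splitOnMax (a ++ '=' :: b) ['='] 1 = [a, b] := by
  unfold PySem.Chars.splitOnMax
  rw [if_neg (by norm_num)]
  have := pv_go_main a h b [] [] ((a ++ '=' :: b).length + 1) (by omega)
  simpa using this

theorem pv_start_decomp {p q : List Char} (h : PySem.Chars.startswith p (q ++ ['=']) = true) :
    ∃ r, p = q ++ '=' :: r := by
  simp [PySem.Chars.startswith, List.isPrefixOf_iff_prefix] at h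
  obtain ⟨r, hr⟩ := h
  exact ⟨r, by simpa using hr.symm⟩

-- the value A extracts from a matching part equals B's prefix-drop
theorem pv_valA_eq {p q : List Char} (hq : '=' ∉ q)
    (h : PySem.Chars.startswith p (q ++ ['=']) = true) :
    pvValA p = p.drop (q ++ ['=']).length := by
  obtain ⟨r, rfl⟩ := pv_start_decomp h
  have h1 : "=".toList = ['='] := rfl
  rw [pvValA, h1, pv_splitOnMax_eq q r hq]
  simp [PySem.List.pyGetD, PySem.List.pyGet?, PySem.List.pyIdx?, List.drop_append]

-- a part starting with c :: _ pins its head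
theorem pv_head_of_start {p t : List Char} {c : Char}
    (h : PySem.Chars.startswith p (c :: t) = true) : p.head? = some c := by
  simp [PySem.Chars.startswith, List.isPrefixOf_iff_prefix] at h
  obtain ⟨r, hr⟩ := h
  simp [← hr]

-- distinct leading characters: at most one of the key prefixes matches a part
theorem pv_start_excl (p : List Char) {c₁ c₂ : Char} {t₁ t₂ : List Char} (hne : c₁ ≠ c₂)
    (h : PySem.Chars.startswith p (c₁ :: t₁) = true) :
    PySem.Chars.startswith p (c₂ :: t₂) = false := by
  cases hx : PySem.Chars.startswith p (c₂ :: t₂) with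
  | false => rfl
  | true =>
    have := (pv_head_of_start h).symm.trans (pv_head_of_start hx)
    simp at this
    exact absurd this hne

-- B's per-key resolution, as a function of an initial value
def pvF (parts : List (List Char)) (q : List Char) (x : List Char) : List Char :=
  match parts.reverse.find? (fun p => PySem.Chars.startswith p (q ++ ['='])) with
  | some p => pvValA p
  | none => x

theorem pvF_cons (p : List Char) (ps : List (List Char)) (q x : List Char) :
    pvF (p :: ps) q x
      = pvF ps q (if PySem.Chars.startswith p (q ++ ['=']) then pvValA p else x) := by
  unfold pvF
  rw [List.reverse_cons, List.find?_append]
  cases hf : ps.reverse.find? (fun p => PySem.Chars.startswith p (q ++ ['='])) with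
  | some v => simp
  | none =>
    simp only [Option.none_or]
    by_cases hp : PySem.Chars.startswith p (q ++ ['=']) = true <;> simp [hp]

theorem pv_excl_pair {p k1 k2 t1 t2 : List Char} {c1 c2 : Char} (hne : c1 ≠ c2)
    (e1 : k1 = c1 :: t1) (e2 : k2 = c2 :: t2)
    (h1 : PySem.Chars.startswith p k1 = true) (h2 : PySem.Chars.startswith p k2 = true) : False := by
  rw [e1] at h1; rw [e2] at h2
  rw [pv_start_excl p hne h1] at h2
  exact absurd h2 (by decide)

theorem pvStepA_fst (st : List Char × List Char × List Char) (p : List Char) :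
    (pvStepA st p).1
      = if PySem.Chars.startswith p ("driver".toList ++ ['=']) = true then pvValA p else st.1 := by
  rw [show "driver".toList ++ ['='] = "driver=".toList from rfl]
  unfold pvStepA
  split_ifs with a b c <;> rfl

theorem pvStepA_snd (st : List Char × List Char × List Char) (p : List Char) :
    (pvStepA st p).2.1
      = if PySem.Chars.startswith p ("serial".toList ++ ['=']) = true then pvValA p else st.2.1 := by
  rw [show "serial".toList ++ ['='] = "serial=".toList from rfl]
  unfold pvStepA
  split_ifs with a b c <;> try rfl
  exact (pv_excl_pair (show ('d' : Char) ≠ 's' by decide)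
    (rfl : "driver=".toList = 'd' :: "river=".toList)
    (rfl : "serial=".toList = 's' :: "erial=".toList) a b).elim

theorem pvStepA_thd (st : List Char × List Char × List Char) (p : List Char) :
    (pvStepA st p).2.2
      = if PySem.Chars.startswith p ("label".toList ++ ['=']) = true then pvValA p else st.2.2 := by
  rw [show "label".toList ++ ['='] = "label=".toList from rfl]
  unfold pvStepA
  split_ifs with a b c d <;> try rfl
  · exact (pv_excl_pair (show ('d' : Char) ≠ 'l' by decide)
      (rfl : "driver=".toList = 'd' :: "river=".toList)
      (rfl : "label=".toList = 'l' :: "abel=".toList) a b).elim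
  · exact (pv_excl_pair (show ('s' : Char) ≠ 'l' by decide)
      (rfl : "serial=".toList = 's' :: "erial=".toList)
      (rfl : "label=".toList = 'l' :: "abel=".toList) c d).elim

theorem pv_foldl_eq (parts : List (List Char)) : ∀ (st : List Char × List Char × List Char),
    parts.foldl pvStepA st
      = (pvF parts "driver".toList st.1, pvF parts "serial".toList st.2.1,
         pvF parts "label".toList st.2.2) := by
  induction parts with
  | nil => intro st; simp [pvF]
  | cons p ps ih =>
    intro st
    rw [List.foldl_cons, ih, pvF_cons, pvF_cons, pvF_cons,
        pvStepA_fst, pvStepA_snd, pvStepA_thd]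

theorem pvF_eq_lastValue (parts : List (List Char)) (q : List Char) (hq : '=' ∉ q) :
    pvF parts q [] = pvLastValue parts q := by
  unfold pvF pvLastValue
  rw [show q ++ "=".toList = q ++ ['='] from rfl]
  cases hf : parts.reverse.find? (fun p => PySem.Chars.startswith p (q ++ ['='])) with
  | none => simp only [hf, Option.map_none, Option.getD_none]
  | some p =>
    have hp : PySem.Chars.startswith p (q ++ ['=']) = true := by
      have h := List.find?_some hf
      simpa using h
    simp only [hf, Option.map_some, Option.getD_some]
    exact pv_valA_eq hq hp

theorem pv_main (parts : List (List Char)) :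
    (if (parts.foldl pvStepA ([], [], [])).2.1 ≠ [] then
        String.ofList ((parts.foldl pvStepA ([], [], [])).1 ++ ':' :: (parts.foldl pvStepA ([], [], [])).2.1)
      else
        String.ofList ((parts.foldl pvStepA ([], [], [])).1 ++ ':' :: (parts.foldl pvStepA ([], [], [])).2.2))
    = String.ofList (pvLastValue parts "driver".toList ++ ':' ::
        (if pvLastValue parts "serial".toList ≠ [] then pvLastValue parts "serial".toList
         else pvLastValue parts "label".toList)) := by
  rw [pv_foldl_eq]
  rw [pvF_eq_lastValue parts "driver".toList (by decide),
      pvF_eq_lastValue parts "serial".toList (by decide),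
      pvF_eq_lastValue parts "label".toList (by decide)]
  split_ifs with h1 <;> rfl

-- ===== VERDICT (by name: the statement is the Claim_ definition above) =====
theorem get_stable_device_id_py_spec : Claim_equal_get_stable_device_id_py := by
  intro device_id _
  unfold Spec_get_stable_device_id_py get_stable_device_id_py get_stable_device_id_py_alt
  exact pv_main (PySem.Chars.splitOn device_id.toList ",".toList)
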